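-- pv_equiv track=rewrite | github.com/jules789/tp-python-Jules-Herrero | chef-oui-chef.py | check_salute
-- ===== SOURCE A (Python) =====
-- def check_salute(string):
--     salutes = 0
--     right_officer_indices = []
--
--     for idx, char in enumerate(string):
--         if char == '>':
--             right_officer_indices.append(idx)
--         elif char == '<':
--             salutes += len([i for i in right_officer_indices if i < idx])
--
--     return salutes
-- ===== SOURCE B (Python) =====
-- def check_salute(string):
--     # Dual counting: each salute pairs a '>' with a '<' to its right, so
--     # precount all '<' and, walking left to right, credit each '>' with the
--     # number of '<' still ahead of it.
--     lefts = string.count('<')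
--     salutes = 0
--     for char in string:
--         if char == '<':
--             lefts -= 1
--         elif char == '>':
--             salutes += lefts
--     return salutes
-- ===== Notes on version B (the rewrite author's own statement) =====
-- stated objective: alternative
-- what changed: Counts the pairs from the dual direction: instead of keeping a list of '>' indices and re-scanning it at every '<', B precounts all '<' once with str.count and credits each '>' with the number of '<' still ahead of it, a single pass with O(1) state.
import Mathlib
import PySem

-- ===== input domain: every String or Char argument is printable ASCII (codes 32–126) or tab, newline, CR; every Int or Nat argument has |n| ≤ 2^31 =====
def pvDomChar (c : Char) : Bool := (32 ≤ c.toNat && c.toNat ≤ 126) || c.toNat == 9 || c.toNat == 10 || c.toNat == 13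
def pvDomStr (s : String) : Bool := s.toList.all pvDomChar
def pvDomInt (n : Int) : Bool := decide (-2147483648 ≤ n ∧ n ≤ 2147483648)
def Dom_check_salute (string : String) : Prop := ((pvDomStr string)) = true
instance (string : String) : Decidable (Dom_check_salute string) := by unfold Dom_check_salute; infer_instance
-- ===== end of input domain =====

-- B counts the pairs from the dual direction: it precounts all '<' once (str.count) and
-- credits each '>' with the '<' still ahead of it, one pass with O(1) state, instead of
-- A's list of '>' indices re-scanned at every '<'.

-- ===== PORT A =====
def check_salute (string : String) : Int :=
  ((PySem.List.enumerate string.toList 0).foldl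
    (fun st p =>
      if p.2 = '>' then (st.1, st.2 ++ [p.1])
      else if p.2 = '<' then
        (st.1 + ((st.2.filter (fun i => decide (i < p.1))).length : Int), st.2)
      else st)
    ((0 : Int), ([] : List Int))).1

-- ===== PORT B =====
def check_salute_alt (string : String) : Int :=
  (string.toList.foldl
    (fun st c =>
      if c = '<' then (st.1, st.2 - 1)
      else if c = '>' then (st.1 + st.2, st.2)
      else st)
    ((0 : Int), (PySem.Str.count string "<" : Int))).1

-- ===== PRECONDITION & SPEC =====
def Spec_check_salute (string : String) (out : Int) : Prop := out = check_salute_alt string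
instance (string : String) (out : Int) : Decidable (Spec_check_salute string out) := by unfold Spec_check_salute; infer_instance

-- ===== CLAIM (what is proved, stated in full; the proofs are below) =====
def Claim_equal_check_salute : Prop := ∀ (string : String), Dom_check_salute string → Spec_check_salute string (check_salute string)

-- ===== LEMMAS AND PROOFS =====

-- str.count with a one-character needle is the character count
theorem chars_count_go_singleton (c : Char) (s : List Char) (fuel acc : Nat)
    (h : s.length ≤ fuel) :
    PySem.Chars.count.go [c] fuel s acc = acc + s.count c := by
  induction s generalizing fuel acc with
  | nil => cases fuel <;> simp [PySem.Chars.count.go]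
  | cons hd t ih =>
    cases fuel with
    | zero => simp at h
    | succ f =>
      have hlen : t.length ≤ f := by simpa using h
      rw [PySem.Chars.count.go]
      by_cases hc : c = hd
      · subst hc
        have hpre : [c].isPrefixOf (c :: t) = true := by simp [List.isPrefixOf]
        simp only [hpre, ite_true, List.length_cons, List.length_nil, List.drop_succ_cons,
          List.drop_zero]
        rw [ih f (acc + 1) hlen, List.count_cons_self]
        omega
      · have hpre : [c].isPrefixOf (hd :: t) = false := by
          simp [List.isPrefixOf, hc]
        simp only [hpre, Bool.false_eq_true, ite_false]
        rw [ih f acc hlen]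
        have hcs : ¬ hd = c := fun h' => hc h'.symm
        simp [hcs]

theorem chars_count_singleton (s : List Char) (c : Char) :
    PySem.Chars.count s [c] = s.count c := by
  have := chars_count_go_singleton c s s.length 0 le_rfl
  simpa [PySem.Chars.count] using this

-- A's fold, with every recorded index below the enumeration start, adds exactly the
-- forward pair count (each '<' credited with the '>' indices seen so far).
theorem check_salute_A_inv (l : List Char) (s sal : Int) (inds : List Int)
    (hlt : ∀ i ∈ inds, i < s) :
    ((PySem.List.enumerate l s).foldl
      (fun st p =>
        if p.2 = '>' then (st.1, st.2 ++ [p.1])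
        else if p.2 = '<' then
          (st.1 + ((st.2.filter (fun i => decide (i < p.1))).length : Int), st.2)
        else st)
      (sal, inds)).1
    = (l.foldl
        (fun st c =>
          if c = '>' then (st.1, st.2 + 1)
          else if c = '<' then (st.1 + st.2, st.2)
          else st)
        (sal, (inds.length : Int))).1 := by
  induction l generalizing s sal inds with
  | nil => simp [PySem.List.enumerate]
  | cons c t ih =>
    rw [PySem.List.enumerate_cons]
    simp only [List.foldl_cons]
    by_cases h1 : c = '>'
    · simp only [h1, ite_true]
      rw [ih (s + 1)]
      · simp
      · intro i hi
        rcases List.mem_append.mp hi with h | h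
        · exact lt_trans (hlt i h) (by omega)
        · simp at h; omega
    · by_cases h2 : c = '<'
      · simp only [h2, reduceIte]
        have hf : inds.filter (fun i => decide (i < s)) = inds := by
          apply List.filter_eq_self.mpr
          intro i hi; simpa using hlt i hi
        rw [hf, if_neg (by decide : ¬('<' : Char) = '>'), if_neg (by decide : ¬('<' : Char) = '>')]
        exact ih (s + 1) _ _ (fun i hi => lt_trans (hlt i hi) (by omega))
      · simp only [h1, h2, ite_false]
        exact ih (s + 1) sal inds (fun i hi => lt_trans (hlt i hi) (by omega))

-- The forward fold (running '>' count) and B's backward fold (remaining '<' count)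
-- compute the same total, relating the counters through seen * (#'<' in the suffix).
theorem fwd_eq_bwd (l : List Char) (sal seen : Int) :
    (l.foldl
      (fun st c =>
        if c = '>' then (st.1, st.2 + 1)
        else if c = '<' then (st.1 + st.2, st.2)
        else st)
      (sal, seen)).1
    = (l.foldl
        (fun st c =>
          if c = '<' then (st.1, st.2 - 1)
          else if c = '>' then (st.1 + st.2, st.2)
          else st)
        (sal + seen * (l.count '<' : Int), (l.count '<' : Int))).1 := by
  induction l generalizing sal seen with
  | nil => simp
  | cons c t ih =>
    simp only [List.foldl_cons]
    by_cases h1 : c = '>'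
    · subst h1
      have hK : (('>' :: t).count '<') = t.count '<' := by
        rw [List.count_cons_of_ne (by decide)]
      rw [hK, if_neg (by decide : ¬('>' : Char) = '<'), if_neg (by decide : ¬('>' : Char) = '<'),
        if_pos rfl, if_pos rfl, ih]
      have hst : sal + (seen + 1) * (t.count '<' : Int)
          = sal + seen * (t.count '<' : Int) + (t.count '<' : Int) := by ring
      rw [hst]
    · by_cases h2 : c = '<'
      · subst h2
        have hK : ((('<' :: t).count '<') : Int) = (t.count '<' : Int) + 1 := by
          rw [List.count_cons_self]; push_cast; ring
        rw [hK, if_neg (by decide : ¬('<' : Char) = '>'), if_pos rfl, if_pos rfl, ih]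
        have hst : sal + seen + seen * (t.count '<' : Int)
            = sal + seen * ((t.count '<' : Int) + 1) := by ring
        rw [hst]
        have hst2 : (t.count '<' : Int) + 1 - 1 = (t.count '<' : Int) := by ring
        rw [hst2]
      · have hK : (('>' :: t).count '<') = t.count '<' := by
          rw [List.count_cons_of_ne (by decide)]
        rw [List.count_cons_of_ne h2, if_neg h1, if_neg h2, if_neg h2, if_neg h1]
        exact ih sal seen

-- ===== VERDICT (by name: the statement is the Claim_ definition above) =====
theorem check_salute_spec : Claim_equal_check_salute := by
  intro s _
  unfold Spec_check_salute check_salute check_salute_alt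
  rw [check_salute_A_inv s.toList 0 0 [] (by simp)]
  simp only [List.length_nil, Nat.cast_zero]
  have := fwd_eq_bwd s.toList 0 0
  simp only [zero_mul, add_zero] at this
  rw [this]
  congr 2
  simp only [PySem.Str.count]
  rw [show ("<" : String).toList = ['<'] from rfl, chars_count_singleton]
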